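-- pv_equiv track=rewrite | github.com/meghanto/iowarp-mcps | iowarp_mcp_clients/wrp_bin/wrp_client/helpers.py | extract_mcp_tools
-- ===== SOURCE A (Python) =====
-- def extract_mcp_tools(text, mcps):
--     """
--     Extract only MCP-specific tools from opencode tool listing text.
--
--     Removes built-in opencode tools and keeps only tools under novel MCP headers
--
--     Args:
--         text (str): The full tool listing text from opencode
--
--     Returns:
--         str: Filtered text containing only MCP-specific tools
--     """
--     lines = text.split('\n')
--
--     # Built-in tool names to remove
--     builtin_tools = {
--         "read", "write", "edit", "list", "glob", "grep",
--         "bash", "task",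
--         "todowrite", "todoread",
--         "webfetch"
--     }
--
--     filtered_lines = []
--     skip_section = False
--
--     for line in lines:
--         # Check if this is a section header
--         if line.startswith('# '):
--             # TBD - More robust detection would be preferable
--
--             # Determine whether this section pertains MCP tools
--             skip_section = True
--
--             for mcp in mcps:
--                 skip_section = (mcp.lower() not in line.strip().lower() and
--                                 "mcp" not in line.strip().lower())
--
--             if skip_section:
--                 continue
--
--         elif skip_section:
--             continue
--         elif ' - ' in line.strip():
--             # Extract tool name by going from start of line to ' - '
--             tool_name = line.strip().split(' - ')[0].strip()
--             # If tool name is in builtin tools, continue (skip this line)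
--             if tool_name in builtin_tools:
--                 continue
--         else:
--             # Skip other lines by default (e.g. other semantic LLM output)
--             continue
--
--         filtered_lines.append(line)
--
--     return '\n'.join(filtered_lines).strip()
-- ===== SOURCE B (Python) =====
-- def extract_mcp_tools(text, mcps):
--     """Two-phase filter: segment the listing into (header, body) sections,
--     then emit the sections that pertain to MCP tools, dropping built-ins."""
--     builtin_tools = {
--         "read", "write", "edit", "list", "glob", "grep",
--         "bash", "task",
--         "todowrite", "todoread",
--         "webfetch"
--     }
--
--     # Phase 1: split lines into segments (header or None, body lines)
--     segments = []
--     cur_header = None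
--     cur_body = []
--     for line in text.split('\n'):
--         if line.startswith('# '):
--             segments.append((cur_header, cur_body))
--             cur_header = line
--             cur_body = []
--         else:
--             cur_body.append(line)
--     segments.append((cur_header, cur_body))
--
--     # Phase 2: emit sections whose header mentions MCP (or one of the mcps)
--     out = []
--     for header, body in segments:
--         if header is None:
--             keep = True
--         else:
--             h = header.strip().lower()
--             keep = 'mcp' in h or any(m.lower() in h for m in mcps)
--         if not keep:
--             continue
--         if header is not None:
--             out.append(header)
--         for line in body:
--             s = line.strip()
--             if ' - ' in s and s.split(' - ')[0].strip() not in builtin_tools: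
--                 out.append(line)
--     return '\n'.join(out).strip()
-- ===== Notes on version B (the rewrite author's own statement) =====
-- stated objective: alternative
-- what changed: Replaces the single pass carrying a mutable skip_section flag by a two-phase decomposition: segment the lines into (header, body) sections, then decide each section's keep condition once and emit its header plus non-builtin ' - ' body lines.
-- intended difference: On texts with a '# ' header that mentions 'mcp' or a non-last element of mcps while A's test fails for it (A's for-loop overwrites skip_section so only the last mcp is consulted, and empty mcps skips even 'mcp' headers), A silently drops the whole section; B keeps it, which is the intended 'keep MCP sections' behaviour. — e.g. on extract_mcp_tools("# mcp\nfoo - bar", []): A returns "", B returns "# mcp\nfoo - bar"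
import Mathlib
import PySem

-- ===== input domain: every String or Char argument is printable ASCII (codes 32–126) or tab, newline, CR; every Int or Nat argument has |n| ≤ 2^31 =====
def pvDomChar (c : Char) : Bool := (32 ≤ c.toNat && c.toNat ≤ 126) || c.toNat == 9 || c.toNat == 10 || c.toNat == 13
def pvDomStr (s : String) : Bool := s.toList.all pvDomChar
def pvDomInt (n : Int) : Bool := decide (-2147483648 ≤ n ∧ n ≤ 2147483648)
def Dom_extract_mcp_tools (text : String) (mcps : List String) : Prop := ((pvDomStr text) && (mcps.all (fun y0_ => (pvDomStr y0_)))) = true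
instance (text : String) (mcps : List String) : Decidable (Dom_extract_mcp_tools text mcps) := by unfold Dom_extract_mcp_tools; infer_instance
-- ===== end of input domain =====

-- B replaces A's single pass with a skip flag by a two-phase segmentation (sections first, emission second), keeping a section when its header mentions 'mcp' or any element of mcps; A consults only the last element (loop-overwrite bug), stated as D_ below.


-- the built-in tool-name set literal both Pythons share
def pvBuiltins : PySem.Set String :=
  PySem.Set.ofList ["read", "write", "edit", "list", "glob", "grep",
    "bash", "task", "todowrite", "todoread", "webfetch"]

-- ===== PORT A =====
-- A's 'for mcp in mcps: skip_section = …' (the flag is overwritten each iteration)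
def pvHeaderSkip (line : String) (mcps : List String) : Bool :=
  mcps.foldl (fun _ mcp =>
    (!(PySem.Str.isIn (PySem.Str.lower mcp) (PySem.Str.lower (PySem.Str.strip line)))) &&
    (!(PySem.Str.isIn "mcp" (PySem.Str.lower (PySem.Str.strip line))))) true

-- A's main loop: state = (filtered_lines, skip_section)
def pvALoop (lines : List String) (acc : List String) (skip : Bool) (mcps : List String) : List String :=
  match lines with
  | [] => acc
  | line :: rest =>
    if PySem.Str.startswith line "# " then
      let skip' := pvHeaderSkip line mcps
      if skip' then pvALoop rest acc skip' mcps
      else pvALoop rest (acc ++ [line]) skip' mcps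
    else if skip then pvALoop rest acc skip mcps
    else if PySem.Str.isIn " - " (PySem.Str.strip line) then
      let toolName := PySem.Str.strip (((PySem.Str.split? (PySem.Str.strip line) " - ").getD []).headD "")
      if PySem.Set.contains pvBuiltins toolName then pvALoop rest acc skip mcps
      else pvALoop rest (acc ++ [line]) skip mcps
    else pvALoop rest acc skip mcps

def extract_mcp_tools (text : String) (mcps : List String) : String :=
  PySem.Str.strip (PySem.Str.join "\n" (pvALoop ((PySem.Str.split? text "\n").getD []) [] false mcps))

-- ===== PORT B =====
-- phase 1 of Source B: split the lines into segments (header or none, body lines); state = (segments, cur)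
def pvBuildSegs (lines : List String) (segs : List (Option String × List String))
    (cur : Option String × List String) : List (Option String × List String) :=
  match lines with
  | [] => segs ++ [cur]
  | l :: rest =>
    if PySem.Str.startswith l "# " then pvBuildSegs rest (segs ++ [cur]) (some l, [])
    else pvBuildSegs rest segs (cur.1, cur.2 ++ [l])

-- Source B's keep condition for a segment header: 'mcp' in it, or any of the mcps in it
def pvKeepSeg (hdr : Option String) (mcps : List String) : Bool :=
  match hdr with
  | none => true
  | some h =>
    let hl := PySem.Str.lower (PySem.Str.strip h)
    PySem.Str.isIn "mcp" hl || mcps.any (fun m => PySem.Str.isIn (PySem.Str.lower m) hl)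

-- Source B's body-line filter: ' - ' present and the tool name not builtin
def pvBodyKeep (line : String) : Bool :=
  let s := PySem.Str.strip line
  PySem.Str.isIn " - " s &&
    !(PySem.Set.contains pvBuiltins (PySem.Str.strip (((PySem.Str.split? s " - ").getD []).headD "")))

-- phase 2 of Source B: emit one segment
def pvEmitSeg (mcps : List String) (seg : Option String × List String) : List String :=
  if pvKeepSeg seg.1 mcps then
    (match seg.1 with | some h => [h] | none => []) ++ seg.2.filter pvBodyKeep
  else []

def extract_mcp_tools_alt (text : String) (mcps : List String) : String :=
  PySem.Str.strip (PySem.Str.join "\n"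
    ((pvBuildSegs ((PySem.Str.split? text "\n").getD []) [] (none, [])).foldl
      (fun acc seg => acc ++ pvEmitSeg mcps seg) []))

-- ===== PRECONDITION & SPEC =====
-- On texts with a '# ' header H that A's section test drops although it pertains to MCP tools — H
-- mentions some element of mcps but not the LAST one and not 'mcp' (A's for-loop overwrites
-- skip_section, so only the last mcp is consulted), or mcps is empty and H mentions 'mcp' (A then
-- skips every headed section) — A silently drops the whole section; B keeps it, the intended behaviour.
def D_extract_mcp_tools (text : String) (mcps : List String) : Prop :=
  ∃ l ∈ (PySem.Str.split? text "\n").getD [], PySem.Str.startswith l "# " = true ∧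
    ((mcps = [] ∧ PySem.Str.isIn "mcp" (PySem.Str.lower (PySem.Str.strip l)) = true) ∨
     (PySem.Str.isIn "mcp" (PySem.Str.lower (PySem.Str.strip l)) = false ∧
      (∃ m ∈ mcps, PySem.Str.isIn (PySem.Str.lower m) (PySem.Str.lower (PySem.Str.strip l)) = true) ∧
      (∀ m ∈ mcps.getLast?.toList, PySem.Str.isIn (PySem.Str.lower m) (PySem.Str.lower (PySem.Str.strip l)) = false)))
instance (text : String) (mcps : List String) : Decidable (D_extract_mcp_tools text mcps) := by unfold D_extract_mcp_tools; infer_instance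

def Spec_extract_mcp_tools (text : String) (mcps : List String) (out : String) : Prop := ¬ D_extract_mcp_tools text mcps → out = extract_mcp_tools_alt text mcps
instance (text : String) (mcps : List String) (out : String) : Decidable (Spec_extract_mcp_tools text mcps out) := by unfold Spec_extract_mcp_tools; infer_instance

def pvDiffWitness_extract_mcp_tools : String × List String := ("# mcp\nfoo - bar", [])
def pvDiffWitnessOut_extract_mcp_tools : String × String := ("", "# mcp\nfoo - bar")

-- ===== CLAIM (what is proved, stated in full; the proofs are below) =====
def Claim_unchanged_extract_mcp_tools : Prop := ∀ (text : String) (mcps : List String), Dom_extract_mcp_tools text mcps → Spec_extract_mcp_tools text mcps (extract_mcp_tools text mcps)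
def Claim_exact_extract_mcp_tools : Prop := ∀ (text : String) (mcps : List String), Dom_extract_mcp_tools text mcps → D_extract_mcp_tools text mcps → extract_mcp_tools text mcps ≠ extract_mcp_tools_alt text mcps
def Claim_changed_extract_mcp_tools : Prop := Dom_extract_mcp_tools (pvDiffWitness_extract_mcp_tools.1) (pvDiffWitness_extract_mcp_tools.2) ∧ D_extract_mcp_tools (pvDiffWitness_extract_mcp_tools.1) (pvDiffWitness_extract_mcp_tools.2) ∧ extract_mcp_tools (pvDiffWitness_extract_mcp_tools.1) (pvDiffWitness_extract_mcp_tools.2) = pvDiffWitnessOut_extract_mcp_tools.1 ∧ extract_mcp_tools_alt (pvDiffWitness_extract_mcp_tools.1) (pvDiffWitness_extract_mcp_tools.2) = pvDiffWitnessOut_extract_mcp_tools.2 ∧ pvDiffWitnessOut_extract_mcp_tools.1 ≠ pvDiffWitnessOut_extract_mcp_tools.2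

-- ===== LEMMAS AND PROOFS =====

-- fold over a list ignoring its accumulator keeps only the last element's value
theorem foldl_const_last {α β : Type} (g : α → β) (b : β) (l : List α) :
    l.foldl (fun _ m => g m) b = ((l.getLast?).map g).getD b := by
  induction l generalizing b with
  | nil => rfl
  | cons x t ih =>
    rw [List.foldl_cons, ih]
    cases t with
    | nil => rfl
    | cons y u =>
      simp [List.getLast?_cons_cons]
      cases hu : (y :: u).getLast? with
      | none => simp [List.getLast?_eq_none_iff] at hu
      | some m => simp

-- proof-side restatements of the two effective header keep tests
def pvDKeepA (line : String) (mcps : List String) : Bool :=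
  ((mcps.getLast?).map (fun m =>
    PySem.Str.isIn (PySem.Str.lower m) (PySem.Str.lower (PySem.Str.strip line)) ||
      PySem.Str.isIn "mcp" (PySem.Str.lower (PySem.Str.strip line)))).getD false

def pvDKeepB (line : String) (mcps : List String) : Bool :=
  PySem.Str.isIn "mcp" (PySem.Str.lower (PySem.Str.strip line)) ||
    mcps.any (fun m => PySem.Str.isIn (PySem.Str.lower m) (PySem.Str.lower (PySem.Str.strip line)))

-- A's keep test implies B's
theorem pv_keep_mono (l : String) (mcps : List String) (h : pvDKeepA l mcps = true) :
    pvDKeepB l mcps = true := by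
  unfold pvDKeepA at h
  unfold pvDKeepB
  cases hlast : mcps.getLast? with
  | none => rw [hlast] at h; exact absurd h (by simp)
  | some m0 =>
    rw [hlast, Option.map_some, Option.getD_some] at h
    rcases Bool.or_eq_true_iff.mp h with hq | hp
    · have hm0 : m0 ∈ mcps := List.mem_of_getLast? hlast
      have : (mcps.any fun m => PySem.Str.isIn (PySem.Str.lower m) (PySem.Str.lower (PySem.Str.strip l))) = true :=
        List.any_eq_true.mpr ⟨m0, hm0, hq⟩
      rw [this, Bool.or_true]
    · rw [hp, Bool.true_or]

-- D_'s per-line condition pins the two keep tests apart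
theorem pvCond_diff (l : String) (mcps : List String)
    (h : (mcps = [] ∧ PySem.Str.isIn "mcp" (PySem.Str.lower (PySem.Str.strip l)) = true) ∨
      (PySem.Str.isIn "mcp" (PySem.Str.lower (PySem.Str.strip l)) = false ∧
       (∃ m ∈ mcps, PySem.Str.isIn (PySem.Str.lower m) (PySem.Str.lower (PySem.Str.strip l)) = true) ∧
       (∀ m ∈ mcps.getLast?.toList, PySem.Str.isIn (PySem.Str.lower m) (PySem.Str.lower (PySem.Str.strip l)) = false))) :
    pvDKeepB l mcps = true ∧ pvDKeepA l mcps = false := by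
  rcases h with ⟨hnil, hP⟩ | ⟨hP, ⟨m, hm, hQ⟩, hall⟩
  · subst hnil
    constructor
    · unfold pvDKeepB; rw [hP, Bool.true_or]
    · rfl
  · have hany : (mcps.any fun m => PySem.Str.isIn (PySem.Str.lower m) (PySem.Str.lower (PySem.Str.strip l))) = true :=
      List.any_eq_true.mpr ⟨m, hm, hQ⟩
    constructor
    · unfold pvDKeepB; rw [hany, Bool.or_true]
    · unfold pvDKeepA
      cases hlast : mcps.getLast? with
      | none => rfl
      | some m0 =>
        have hQ0 : PySem.Str.isIn (PySem.Str.lower m0) (PySem.Str.lower (PySem.Str.strip l)) = false := by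
          refine hall m0 ?_
          rw [hlast]; simp
        rw [Option.map_some, Option.getD_some, hQ0, hP, Bool.or_self]

-- outside D_'s per-line condition the two keep tests agree
theorem keep_eq (l : String) (mcps : List String)
    (h : ¬((mcps = [] ∧ PySem.Str.isIn "mcp" (PySem.Str.lower (PySem.Str.strip l)) = true) ∨
      (PySem.Str.isIn "mcp" (PySem.Str.lower (PySem.Str.strip l)) = false ∧
       (∃ m ∈ mcps, PySem.Str.isIn (PySem.Str.lower m) (PySem.Str.lower (PySem.Str.strip l)) = true) ∧
       (∀ m ∈ mcps.getLast?.toList, PySem.Str.isIn (PySem.Str.lower m) (PySem.Str.lower (PySem.Str.strip l)) = false)))) :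
    pvDKeepA l mcps = pvDKeepB l mcps := by
  rw [not_or] at h
  obtain ⟨h1, h2⟩ := h
  cases hlast : mcps.getLast? with
  | none =>
    have hnil : mcps = [] := List.getLast?_eq_none_iff.mp hlast
    subst hnil
    have hP : PySem.Str.isIn "mcp" (PySem.Str.lower (PySem.Str.strip l)) = false :=
      Bool.eq_false_iff.mpr (fun hp => h1 ⟨rfl, hp⟩)
    simp only [pvDKeepA, pvDKeepB, List.getLast?_nil, Option.map_none, Option.getD_none,
      List.any_nil, Bool.or_false]
    exact hP.symm
  | some m0 =>
    simp only [pvDKeepA, pvDKeepB, hlast, Option.map_some, Option.getD_some]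
    by_cases hP : PySem.Str.isIn "mcp" (PySem.Str.lower (PySem.Str.strip l)) = true
    · rw [hP, Bool.or_true, Bool.true_or]
    · have hP' : PySem.Str.isIn "mcp" (PySem.Str.lower (PySem.Str.strip l)) = false :=
        Bool.eq_false_iff.mpr hP
      rw [hP', Bool.or_false, Bool.false_or]
      by_cases hQ0 : PySem.Str.isIn (PySem.Str.lower m0) (PySem.Str.lower (PySem.Str.strip l)) = true
      · have hm0 : m0 ∈ mcps := List.mem_of_getLast? hlast
        have hany : (mcps.any fun m => PySem.Str.isIn (PySem.Str.lower m) (PySem.Str.lower (PySem.Str.strip l))) = true :=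
          List.any_eq_true.mpr ⟨m0, hm0, hQ0⟩
        rw [hQ0, hany]
      · have hQ0' : PySem.Str.isIn (PySem.Str.lower m0) (PySem.Str.lower (PySem.Str.strip l)) = false :=
          Bool.eq_false_iff.mpr hQ0
        have hnone : ¬ ∃ m ∈ mcps, PySem.Str.isIn (PySem.Str.lower m) (PySem.Str.lower (PySem.Str.strip l)) = true := by
          intro hex
          refine h2 ⟨hP', hex, ?_⟩
          intro m hm
          rw [hlast] at hm
          simp only [Option.toList_some, List.mem_singleton] at hm
          subst hm
          exact hQ0'
        have hany : (mcps.any fun m => PySem.Str.isIn (PySem.Str.lower m) (PySem.Str.lower (PySem.Str.strip l))) = false :=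
          Bool.eq_false_iff.mpr (fun hy => hnone (List.any_eq_true.mp hy))
        rw [hQ0', hany]

-- A's mcps loop keeps only the last iteration: skip = !pvDKeepA
theorem pvHeaderSkip_eq (line : String) (mcps : List String) :
    pvHeaderSkip line mcps = !pvDKeepA line mcps := by
  unfold pvHeaderSkip pvDKeepA
  rw [foldl_const_last]
  cases mcps.getLast? with
  | none => rfl
  | some m => simp [Bool.not_or]

theorem pvKeepSeg_eq (line : String) (mcps : List String) :
    pvKeepSeg (some line) mcps = pvDKeepB line mcps := rfl

-- pvALoop's accumulator is a pure prefix of its result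
theorem pvALoop_acc (lines : List String) (acc : List String) (skip : Bool) (mcps : List String) :
    pvALoop lines acc skip mcps = acc ++ pvALoop lines [] skip mcps := by
  induction lines generalizing acc skip with
  | nil => simp [pvALoop]
  | cons l rest ih =>
    simp only [pvALoop]
    split_ifs with h1 h2 h3 h4
    · exact ih _ _
    · rw [ih (acc ++ [l]), ih ([] ++ [l])]; simp
    · exact ih _ _
    · exact ih _ _
    · rw [ih (acc ++ [l]), ih ([] ++ [l])]; simp
    · exact ih _ _

-- the common section scan both programs compute, parametrised by the header keep test
def pvScan (k : String → Bool) (lines : List String) (cur : Bool) : List String :=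
  match lines with
  | [] => []
  | l :: rest =>
    if PySem.Str.startswith l "# " then
      if k l then l :: pvScan k rest true else pvScan k rest false
    else if cur && pvBodyKeep l then l :: pvScan k rest cur
    else pvScan k rest cur

-- A's loop is the scan with A's keep test
theorem pvAScan (mcps : List String) (lines : List String) (skip : Bool) :
    pvALoop lines [] skip mcps = pvScan (fun l => pvDKeepA l mcps) lines (!skip) := by
  induction lines generalizing skip with
  | nil => rfl
  | cons l rest ih =>
    simp only [pvALoop, pvScan, pvHeaderSkip_eq]
    by_cases hh : PySem.Str.startswith l "# " = true
    · simp only [hh, if_true]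
      by_cases hk : pvDKeepA l mcps = true
      · simp only [hk, Bool.not_true, Bool.false_eq_true, if_false, if_true, List.nil_append]
        rw [pvALoop_acc rest [l], ih false]
        rfl
      · have hk' : pvDKeepA l mcps = false := Bool.eq_false_iff.mpr hk
        simp only [hk', Bool.not_false, if_true, Bool.false_eq_true, if_false]
        rw [ih true]
        rfl
    · have hh' : PySem.Str.startswith l "# " = false := Bool.eq_false_iff.mpr hh
      simp only [hh', Bool.false_eq_true, if_false]
      cases skip with
      | true =>
        simp only [if_true, Bool.not_true, Bool.false_and, Bool.false_eq_true, if_false]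
        exact ih true
      | false =>
        simp only [Bool.false_eq_true, if_false, Bool.not_false, Bool.true_and]
        unfold pvBodyKeep
        by_cases hm : PySem.Str.isIn " - " (PySem.Str.strip l) = true
        · by_cases hc : PySem.Set.contains pvBuiltins
              (PySem.Str.strip (((PySem.Str.split? (PySem.Str.strip l) " - ").getD []).headD "")) = true
          · simp only [hm, if_true, hc, Bool.not_true, Bool.and_false,
              Bool.false_eq_true, if_false]
            exact ih false
          · have hc' := Bool.eq_false_iff.mpr hc
            simp only [hm, if_true, hc, Bool.not_false, Bool.and_true,
              Bool.false_eq_true, if_false, if_true, List.nil_append]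
            rw [pvALoop_acc rest [l], ih false]
            rfl
        · have hm' : PySem.Str.isIn " - " (PySem.Str.strip l) = false := Bool.eq_false_iff.mpr hm
          simp only [hm', Bool.false_eq_true, if_false, Bool.false_and]
          exact ih false

-- B's segment build-and-emit is the scan with B's keep test
theorem pvBScan (mcps : List String) (lines : List String)
    (segs : List (Option String × List String)) (cur : Option String × List String) :
    (pvBuildSegs lines segs cur).flatMap (pvEmitSeg mcps) =
      segs.flatMap (pvEmitSeg mcps) ++ pvEmitSeg mcps cur ++
        pvScan (fun l => pvDKeepB l mcps) lines (pvKeepSeg cur.1 mcps) := by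
  induction lines generalizing segs cur with
  | nil => simp [pvBuildSegs, pvScan]
  | cons l rest ih =>
    simp only [pvBuildSegs, pvScan]
    by_cases hh : PySem.Str.startswith l "# " = true
    · simp only [hh, if_true, ih, List.flatMap_append]
      by_cases hk : pvDKeepB l mcps = true
      · simp [pvEmitSeg, pvKeepSeg_eq, hk]
      · have hk' := Bool.eq_false_iff.mpr hk
        simp [pvEmitSeg, pvKeepSeg_eq, hk']
    · have hh' : PySem.Str.startswith l "# " = false := Bool.eq_false_iff.mpr hh
      have hemit : pvEmitSeg mcps (cur.1, cur.2 ++ [l]) =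
          pvEmitSeg mcps cur ++
            (if pvKeepSeg cur.1 mcps && pvBodyKeep l then [l] else []) := by
        unfold pvEmitSeg
        by_cases hk : pvKeepSeg cur.1 mcps = true
        · simp [hk, List.filter_append]
          by_cases hb : pvBodyKeep l = true <;> simp [hb]
        · have hk' := Bool.eq_false_iff.mpr hk
          simp [hk']
      simp only [hh', Bool.false_eq_true, if_false, ih, hemit]
      by_cases hkb : (pvKeepSeg cur.1 mcps && pvBodyKeep l) = true
      · simp [hkb]
      · have hkb' := Bool.eq_false_iff.mpr hkb
        simp [hkb']

-- the scan only consults the keep test on header lines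
theorem pvScan_congr (k1 k2 : String → Bool) (lines : List String) (cur : Bool)
    (h : ∀ l ∈ lines, PySem.Str.startswith l "# " = true → k1 l = k2 l) :
    pvScan k1 lines cur = pvScan k2 lines cur := by
  induction lines generalizing cur with
  | nil => rfl
  | cons l rest ih =>
    have hrest : ∀ x ∈ rest, PySem.Str.startswith x "# " = true → k1 x = k2 x :=
      fun x hx => h x (List.mem_cons_of_mem _ hx)
    simp only [pvScan]
    by_cases hh : PySem.Str.startswith l "# " = true
    · rw [h l List.mem_cons_self hh]
      simp only [hh, if_true]
      by_cases hk : k2 l = true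
      · simp only [hk, if_true, ih true hrest]
      · have hk' := Bool.eq_false_iff.mpr hk
        simp only [hk', Bool.false_eq_true, if_false, ih false hrest]
    · have hh' := Bool.eq_false_iff.mpr hh
      simp only [hh', Bool.false_eq_true, if_false]
      by_cases hcb : (cur && pvBodyKeep l) = true
      · simp only [hcb, if_true, ih cur hrest]
      · have hcb' := Bool.eq_false_iff.mpr hcb
        simp only [hcb', Bool.false_eq_true, if_false, ih cur hrest]

-- count of non-whitespace characters: invariant under strip, additive under join "\n"
def pvNws (s : String) : Nat := s.toList.countP (fun c => !PySem.Chars.isspace c)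

def pvNwsL (ls : List String) : Nat := (ls.map pvNws).sum

theorem countP_dropWhile_isspace (l : List Char) :
    (l.dropWhile PySem.Chars.isspace).countP (fun c => !PySem.Chars.isspace c) =
      l.countP (fun c => !PySem.Chars.isspace c) := by
  induction l with
  | nil => rfl
  | cons c t ih =>
    by_cases hc : PySem.Chars.isspace c = true
    · rw [List.dropWhile_cons_of_pos hc, ih, List.countP_cons]
      simp [hc]
    · have hc' := Bool.eq_false_iff.mpr hc
      rw [List.dropWhile_cons_of_neg (by simp [hc'])]

theorem pvNws_strip (s : String) : pvNws (PySem.Str.strip s) = pvNws s := by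
  unfold pvNws PySem.Str.strip PySem.Chars.strip PySem.Chars.lstrip PySem.Chars.rstrip
  rw [String.toList_ofList, List.countP_reverse, countP_dropWhile_isspace,
    List.countP_reverse, countP_dropWhile_isspace]

theorem pvNwsC_join (L : List (List Char)) :
    (PySem.Chars.join ['\n'] L).countP (fun c => !PySem.Chars.isspace c) =
      (L.map (List.countP (fun c => !PySem.Chars.isspace c))).sum := by
  induction L with
  | nil => rfl
  | cons x t ih =>
    cases t with
    | nil => simp [PySem.Chars.join_singleton]
    | cons y u =>
      rw [PySem.Chars.join_cons_cons, List.countP_append, List.countP_append, ih]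
      have hsep : (['\n'] : List Char).countP (fun c => !PySem.Chars.isspace c) = 0 := by decide
      rw [hsep]
      simp

theorem pvNws_join (L : List String) : pvNws (PySem.Str.join "\n" L) = pvNwsL L := by
  unfold pvNws PySem.Str.join
  rw [String.toList_ofList]
  have h : "\n".toList = ['\n'] := rfl
  rw [h, pvNwsC_join, List.map_map]
  rfl

-- a header line contains the non-whitespace character '#'
theorem pvNws_header (l : String) (h : PySem.Str.startswith l "# " = true) : 1 ≤ pvNws l := by
  have h2 : PySem.Chars.startswith l.toList ("# ".toList) = true := by simpa using h
  obtain ⟨t, ht⟩ := (PySem.Chars.startswith_iff _ _).mp h2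
  have hsub : List.Sublist ['#'] l.toList := by
    rw [← ht]
    exact List.Sublist.cons₂ _ (List.nil_sublist _)
  have hle := List.Sublist.countP_le (p := fun c => !PySem.Chars.isspace c) hsub
  unfold pvNws
  have h1 : (['#'] : List Char).countP (fun c => !PySem.Chars.isspace c) = 1 := by decide
  omega

-- scan output never has more non-whitespace when the keep test and the active flag are smaller
theorem pvS_mono (kA kB : String → Bool) (lines : List String) :
    ∀ (cA cB : Bool),
      (∀ l ∈ lines, PySem.Str.startswith l "# " = true → kA l = true → kB l = true) →
      (cA = true → cB = true) →
      pvNwsL (pvScan kA lines cA) ≤ pvNwsL (pvScan kB lines cB) := by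
  induction lines with
  | nil => intro cA cB _ _; exact Nat.le_refl _
  | cons l rest ih =>
    intro cA cB hm hc
    have hrest : ∀ x ∈ rest, PySem.Str.startswith x "# " = true → kA x = true → kB x = true :=
      fun x hx => hm x (List.mem_cons_of_mem _ hx)
    simp only [pvScan]
    by_cases hh : PySem.Str.startswith l "# " = true
    · simp only [hh, if_true]
      by_cases hka : kA l = true
      · have hkb : kB l = true := hm l List.mem_cons_self hh hka
        simp only [hka, hkb, if_true, pvNwsL, List.map_cons, List.sum_cons]
        exact Nat.add_le_add_left (ih true true hrest (fun h => h)) _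
      · have hka' := Bool.eq_false_iff.mpr hka
        simp only [hka', Bool.false_eq_true, if_false]
        by_cases hkb : kB l = true
        · simp only [hkb, if_true, pvNwsL, List.map_cons, List.sum_cons]
          calc pvNwsL (pvScan kA rest false)
              ≤ pvNwsL (pvScan kB rest true) := ih false true hrest (by simp)
            _ ≤ pvNws l + pvNwsL (pvScan kB rest true) := Nat.le_add_left _ _
        · have hkb' := Bool.eq_false_iff.mpr hkb
          simp only [hkb', Bool.false_eq_true, if_false]
          exact ih false false hrest (fun h => h)
    · have hh' := Bool.eq_false_iff.mpr hh
      simp only [hh', Bool.false_eq_true, if_false]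
      cases cA with
      | true =>
        have hcb : cB = true := hc rfl
        subst hcb
        by_cases hb : pvBodyKeep l = true
        · simp only [hb, Bool.and_true, if_true, pvNwsL, List.map_cons, List.sum_cons]
          exact Nat.add_le_add_left (ih true true hrest (fun h => h)) _
        · have hb' := Bool.eq_false_iff.mpr hb
          simp only [hb', Bool.and_false, Bool.false_eq_true, if_false]
          exact ih true true hrest (fun h => h)
      | false =>
        simp only [Bool.false_and, Bool.false_eq_true, if_false]
        by_cases hcb : (cB && pvBodyKeep l) = true
        · simp only [hcb, if_true, pvNwsL, List.map_cons, List.sum_cons]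
          calc pvNwsL (pvScan kA rest false)
              ≤ pvNwsL (pvScan kB rest cB) := ih false cB hrest (by simp)
            _ ≤ pvNws l + pvNwsL (pvScan kB rest cB) := Nat.le_add_left _ _
        · have hcb' := Bool.eq_false_iff.mpr hcb
          simp only [hcb', Bool.false_eq_true, if_false]
          exact ih false cB hrest (by simp)

-- a header kept by kB but not by kA makes the inequality strict
theorem pvS_strict (kA kB : String → Bool) (lines : List String) :
    ∀ (cA cB : Bool),
      (∀ l ∈ lines, PySem.Str.startswith l "# " = true → kA l = true → kB l = true) →
      (cA = true → cB = true) →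
      (∃ l ∈ lines, PySem.Str.startswith l "# " = true ∧ kB l = true ∧ kA l = false) →
      pvNwsL (pvScan kA lines cA) < pvNwsL (pvScan kB lines cB) := by
  induction lines with
  | nil =>
    intro cA cB _ _ hw
    obtain ⟨l, hl, _⟩ := hw
    exact absurd hl (List.not_mem_nil)
  | cons l rest ih =>
    intro cA cB hm hc hw
    have hrest : ∀ x ∈ rest, PySem.Str.startswith x "# " = true → kA x = true → kB x = true :=
      fun x hx => hm x (List.mem_cons_of_mem _ hx)
    simp only [pvScan]
    by_cases hh : PySem.Str.startswith l "# " = true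
    · simp only [hh, if_true]
      by_cases hka : kA l = true
      · have hkb : kB l = true := hm l List.mem_cons_self hh hka
        simp only [hka, hkb, if_true, pvNwsL, List.map_cons, List.sum_cons]
        have hw' : ∃ x ∈ rest, PySem.Str.startswith x "# " = true ∧ kB x = true ∧ kA x = false := by
          obtain ⟨w, hwmem, hw1, hw2, hw3⟩ := hw
          rcases List.mem_cons.mp hwmem with rfl | hwr
          · rw [hka] at hw3; exact absurd hw3 (by simp)
          · exact ⟨w, hwr, hw1, hw2, hw3⟩
        exact Nat.add_lt_add_left (ih true true hrest (fun h => h) hw') _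
      · have hka' := Bool.eq_false_iff.mpr hka
        simp only [hka', Bool.false_eq_true, if_false]
        by_cases hkb : kB l = true
        · simp only [hkb, if_true, pvNwsL, List.map_cons, List.sum_cons]
          have hle : pvNwsL (pvScan kA rest false) ≤ pvNwsL (pvScan kB rest true) :=
            pvS_mono kA kB rest false true hrest (by simp)
          have hhd := pvNws_header l hh
          simp only [pvNwsL] at hle
          omega
        · have hkb' := Bool.eq_false_iff.mpr hkb
          simp only [hkb', Bool.false_eq_true, if_false]
          have hw' : ∃ x ∈ rest, PySem.Str.startswith x "# " = true ∧ kB x = true ∧ kA x = false := by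
            obtain ⟨w, hwmem, hw1, hw2, hw3⟩ := hw
            rcases List.mem_cons.mp hwmem with rfl | hwr
            · rw [hkb'] at hw2; exact absurd hw2 (by simp)
            · exact ⟨w, hwr, hw1, hw2, hw3⟩
          exact ih false false hrest (fun h => h) hw'
    · have hh' := Bool.eq_false_iff.mpr hh
      have hw' : ∃ x ∈ rest, PySem.Str.startswith x "# " = true ∧ kB x = true ∧ kA x = false := by
        obtain ⟨w, hwmem, hw1, hw2, hw3⟩ := hw
        rcases List.mem_cons.mp hwmem with rfl | hwr
        · rw [hh'] at hw1; exact absurd hw1 (by simp)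
        · exact ⟨w, hwr, hw1, hw2, hw3⟩
      simp only [hh', Bool.false_eq_true, if_false]
      cases cA with
      | true =>
        have hcb : cB = true := hc rfl
        subst hcb
        by_cases hb : pvBodyKeep l = true
        · simp only [hb, Bool.and_true, if_true, pvNwsL, List.map_cons, List.sum_cons]
          exact Nat.add_lt_add_left (ih true true hrest (fun h => h) hw') _
        · have hb' := Bool.eq_false_iff.mpr hb
          simp only [hb', Bool.and_false, Bool.false_eq_true, if_false]
          exact ih true true hrest (fun h => h) hw'
      | false =>
        simp only [Bool.false_and, Bool.false_eq_true, if_false]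
        by_cases hcb : (cB && pvBodyKeep l) = true
        · simp only [hcb, if_true, pvNwsL, List.map_cons, List.sum_cons]
          have hlt := ih false cB hrest (by simp) hw'
          simp only [pvNwsL] at hlt
          omega
        · have hcb' := Bool.eq_false_iff.mpr hcb
          simp only [hcb', Bool.false_eq_true, if_false]
          exact ih false cB hrest (by simp) hw'

-- both outputs as scans of the same line list
theorem pvA_as_scan (text : String) (mcps : List String) :
    extract_mcp_tools text mcps =
      PySem.Str.strip (PySem.Str.join "\n"
        (pvScan (fun l => pvDKeepA l mcps) ((PySem.Str.split? text "\n").getD []) true)) := by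
  unfold extract_mcp_tools
  rw [pvAScan]
  rfl

theorem pvB_as_scan (text : String) (mcps : List String) :
    extract_mcp_tools_alt text mcps =
      PySem.Str.strip (PySem.Str.join "\n"
        (pvScan (fun l => pvDKeepB l mcps) ((PySem.Str.split? text "\n").getD []) true)) := by
  unfold extract_mcp_tools_alt
  rw [PySem.List.foldl_append_eq_flatMap, pvBScan]
  simp [pvEmitSeg, pvKeepSeg]

-- ===== VERDICT (by name: the statement is the Claim_ definition above) =====
theorem extract_mcp_tools_spec : Claim_unchanged_extract_mcp_tools := by
  intro text mcps _ hnd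
  unfold D_extract_mcp_tools at hnd
  rw [pvA_as_scan, pvB_as_scan, pvScan_congr (fun l => pvDKeepA l mcps) (fun l => pvDKeepB l mcps)]
  intro l hl hs
  refine keep_eq l mcps ?_
  intro hbad
  exact hnd ⟨l, hl, hs, hbad⟩

theorem extract_mcp_tools_changed : Claim_changed_extract_mcp_tools := by
  unfold Claim_changed_extract_mcp_tools; decide

theorem extract_mcp_tools_tight : Claim_exact_extract_mcp_tools := by
  intro text mcps _ hd heq
  obtain ⟨l, hl, hs, hcond⟩ := hd
  obtain ⟨hkb, hka⟩ := pvCond_diff l mcps hcond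
  have hlt : pvNws (extract_mcp_tools text mcps) < pvNws (extract_mcp_tools_alt text mcps) := by
    rw [pvA_as_scan, pvB_as_scan, pvNws_strip, pvNws_strip, pvNws_join, pvNws_join]
    exact pvS_strict (fun x => pvDKeepA x mcps) (fun x => pvDKeepB x mcps)
      ((PySem.Str.split? text "\n").getD []) true true
      (fun x _ _ hx => pv_keep_mono x mcps hx) (fun h => h) ⟨l, hl, hs, hkb, hka⟩
  rw [heq] at hlt
  exact Nat.lt_irrefl _ hlt
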